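-- pv_equiv track=rewrite | github.com/jpavelka/cfb-transitivity | app/routes.py | get_levels
-- ===== SOURCE A (Python) =====
-- def get_levels(paths, all_teams, team):
--     included_teams = []
--     if len(paths) == 0:
--         max_length = 0
--     else:
--         max_length = max(len(paths[t]) - 1 for t in paths)
--     levels = {i + 1: [] for i in range(max_length)}
--     for t in paths:
--         levels[len(paths[t]) - 1] += [t]
--         included_teams += [t]
--     for l in levels:
--         levels[l] = sorted(levels[l])
--     excluded_teams = sorted(set(all_teams) - set(included_teams) -{team})
--     return levels, excluded_teams
-- ===== SOURCE B (Python) =====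
-- def get_levels(paths, all_teams, team):
--     max_length = max((len(p) - 1 for p in paths.values()), default=0)
--     order = sorted(paths)
--     levels = {l: [t for t in order if len(paths[t]) - 1 == l]
--               for l in range(1, max_length + 1)}
--     excluded_teams = sorted(set(all_teams) - set(paths) - {team})
--     return levels, excluded_teams
-- ===== Notes on version B (the rewrite author's own statement) =====
-- stated objective: simpler
-- what changed: A buckets teams into per-level lists by mutating a pre-initialized dict and then sorts every bucket; B sorts the team names once globally and builds the levels dict in a single comprehension that filters the sorted list per level, with no mutation and no per-bucket sorts.
import Mathlib
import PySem

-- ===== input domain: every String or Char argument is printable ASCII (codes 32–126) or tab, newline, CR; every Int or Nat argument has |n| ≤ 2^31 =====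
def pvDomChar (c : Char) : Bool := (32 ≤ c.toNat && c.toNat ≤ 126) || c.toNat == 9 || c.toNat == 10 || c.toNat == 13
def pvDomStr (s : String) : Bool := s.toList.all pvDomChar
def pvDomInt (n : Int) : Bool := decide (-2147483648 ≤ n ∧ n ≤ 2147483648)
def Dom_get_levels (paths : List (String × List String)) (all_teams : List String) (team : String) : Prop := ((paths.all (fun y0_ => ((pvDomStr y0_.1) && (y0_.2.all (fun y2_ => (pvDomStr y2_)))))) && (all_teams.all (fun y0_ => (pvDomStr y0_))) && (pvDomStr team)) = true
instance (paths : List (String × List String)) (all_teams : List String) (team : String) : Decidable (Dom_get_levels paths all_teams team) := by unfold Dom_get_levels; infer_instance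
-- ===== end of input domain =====

-- B replaces A's mutate-buckets-then-sort-each-bucket structure by one global sort of the
-- team names plus a per-level filter comprehension (objective: simpler). Equivalence of the
-- RETURN value on Pre_ (where the Python A returns normally) is what is proved.

-- ===== PORT A =====
def get_levels (paths : List (String × List String)) (all_teams : List String) (team : String) : (List (Int × List String)) × List String :=
  let d := PySem.Dict.ofList paths
  let max_length : Int :=
    if paths.length = 0 then 0
    else (PySem.List.max? (d.keys.map (fun t => ((d.getD t []).length : Int) - 1)) (fun x => x)).getD 0
  let levels0 : PySem.Dict Int (List String) :=
    (PySem.List.pyRange 0 max_length 1).foldl (fun lv i => lv.insert (i + 1) []) PySem.Dict.empty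
  -- 'for t in paths: levels[len(paths[t])-1] += [t]; included_teams += [t]'
  -- (levels[k] += [t] raises KeyError when k is absent — outside Pre_; modify's default is never used inside Pre_)
  let st := d.keys.foldl
    (fun (st : PySem.Dict Int (List String) × List String) t =>
      (st.1.modify (((d.getD t []).length : Int) - 1) [] (fun v => v ++ [t]), st.2 ++ [t]))
    (levels0, [])
  -- 'for l in levels: levels[l] = sorted(levels[l])'
  let levels := st.1.keys.foldl
    (fun lv l => lv.insert l (PySem.List.sorted (lv.getD l []) (fun x => x) false)) st.1
  let excluded_teams := PySem.List.sorted
    (PySem.Set.diff (PySem.Set.diff (PySem.Set.ofList all_teams) st.2) [team]) (fun x => x) false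
  (levels.items, excluded_teams)

-- ===== PORT B =====
def get_levels_alt (paths : List (String × List String)) (all_teams : List String) (team : String) : (List (Int × List String)) × List String :=
  let d := PySem.Dict.ofList paths
  let max_length : Int :=
    (PySem.List.max? (d.values.map (fun p => (p.length : Int) - 1)) (fun x => x)).getD 0
  let order := PySem.List.sorted d.keys (fun t => t) false
  -- '{l: [t for t in order if len(paths[t])-1 == l] for l in range(1, max_length+1)}'
  let levels : PySem.Dict Int (List String) :=
    (PySem.List.pyRange 1 (max_length + 1) 1).foldl
      (fun lv l => lv.insert l (order.filter (fun t => ((d.getD t []).length : Int) - 1 == l)))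
      PySem.Dict.empty
  let excluded_teams := PySem.List.sorted
    (PySem.Set.diff (PySem.Set.diff (PySem.Set.ofList all_teams) d.keys) [team]) (fun x => x) false
  (levels.items, excluded_teams)

-- ===== PRECONDITION & SPEC =====
-- Pre_ excludes exactly the inputs on which A raises KeyError: a non-empty paths dict in which
-- some path list has fewer than 2 entries (its level len-1 < 1 is never a key of levels).
def Pre_get_levels (paths : List (String × List String)) (all_teams : List String) (team : String) : Prop :=
  ∀ v ∈ (PySem.Dict.ofList paths).values, 2 ≤ v.length
instance (paths : List (String × List String)) (all_teams : List String) (team : String) : Decidable (Pre_get_levels paths all_teams team) := by unfold Pre_get_levels; infer_instance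
def pvWitness_get_levels : (List (String × List String)) × List String × String :=
  ([("a", ["b", "c"]), ("b", ["b", "d", "a"])], ["a", "z"], "b")

def Spec_get_levels (paths : List (String × List String)) (all_teams : List String) (team : String) (out : (List (Int × List String)) × List String) : Prop := out = get_levels_alt paths all_teams team
instance (paths : List (String × List String)) (all_teams : List String) (team : String) (out : (List (Int × List String)) × List String) : Decidable (Spec_get_levels paths all_teams team out) := by unfold Spec_get_levels; infer_instance

-- ===== CLAIM (what is proved, stated in full; the proofs are below) =====
def Claim_equal_get_levels : Prop := ∀ (paths : List (String × List String)) (all_teams : List String) (team : String), Dom_get_levels paths all_teams team → Pre_get_levels paths all_teams team → Spec_get_levels paths all_teams team (get_levels paths all_teams team)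
-- ===== LEMMAS AND PROOFS =====

-- A's single loop updating the pair (levels, included_teams) splits into two independent folds.
theorem pv_foldl_pair_split (l : List String)
    (f : PySem.Dict Int (List String) → String → PySem.Dict Int (List String))
    (lv0 : PySem.Dict Int (List String)) (inc0 : List String) :
    l.foldl (fun st t => (f st.1 t, st.2 ++ [t])) (lv0, inc0) = (l.foldl f lv0, inc0 ++ l) := by
  induction l generalizing lv0 inc0 with
  | nil => simp
  | cons x xs ih => simpa using ih (f lv0 x) (inc0 ++ [x])

theorem pv_update_of_subset {α : Type} [BEq α] [LawfulBEq α] (l : List α) (s : PySem.Set α)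
    (h : ∀ x ∈ l, x ∈ s) : PySem.Set.update s l = s := by
  induction l generalizing s with
  | nil => simp [PySem.Set.update_nil]
  | cons x xs ih =>
      rw [PySem.Set.update_cons, PySem.Set.add_of_mem (h x (by simp))]
      exact ih s (fun y hy => h y (by simp [hy]))

theorem pv_getD_nil_foldl_insert (l : List Int) (acc : PySem.Dict Int (List String))
    (h : ∀ c, acc.getD c [] = []) :
    ∀ c, (l.foldl (fun lv i => lv.insert (i + 1) ([] : List String)) acc).getD c [] = [] := by
  induction l generalizing acc with
  | nil => exact h
  | cons x xs ih =>
      intro c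
      refine ih _ (fun c' => ?_) c
      rw [PySem.Dict.getD_insert]
      split <;> simp [h]

theorem pv_sortfold (ls : List Int) (lv : PySem.Dict Int (List String)) (hnd : ls.Nodup) :
    ∀ c, (ls.foldl (fun lv l => lv.insert l (PySem.List.sorted (lv.getD l []) (fun x => x) false)) lv).getD c []
      = if c ∈ ls then PySem.List.sorted (lv.getD c []) (fun x => x) false else lv.getD c [] := by
  induction ls generalizing lv with
  | nil => simp
  | cons x xs ih =>
      intro c
      rcases List.nodup_cons.mp hnd with ⟨hx, hxs⟩
      rw [List.foldl_cons, ih _ hxs c]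
      by_cases hc : c ∈ xs
      · have hne : c ≠ x := fun h => hx (h ▸ hc)
        simp [hc, hne, PySem.Dict.getD_insert]
      · by_cases hcx : c = x
        · subst hcx
          simp [hc]
        · simp [hc, hcx, PySem.Dict.getD_insert]

theorem pv_map_succ_pyRange (m : Int) :
    (PySem.List.pyRange 0 m 1).map (fun i => i + 1) = PySem.List.pyRange 1 (m + 1) 1 := by
  rw [PySem.List.pyRange_one, PySem.List.pyRange_one]
  have : m - 0 = m + 1 - 1 := by ring
  rw [List.map_map, this]
  exact List.map_congr_left (fun k _ => by simp only [Function.comp_apply]; omega)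

-- filter commutes with a global sort by name (names distinct).
theorem pv_filter_sorted (xs : List String) (p : String → Bool) (h : xs.Nodup) :
    PySem.List.sorted (xs.filter p) (fun x => x) false
      = (PySem.List.sorted xs (fun x => x) false).filter p := by
  apply PySem.List.sorted_eq_of_perm_of_pairwise_lt
  · exact (PySem.List.sorted_perm xs (fun x => x) false).filter p
  · have hle := PySem.List.sorted_pairwise xs (fun x => x)
    have hnd : (PySem.List.sorted xs (fun x => x) false).Nodup :=
      ((PySem.List.sorted_perm xs (fun x => x) false).nodup_iff).mpr h
    have hlt : (PySem.List.sorted xs (fun x => x) false).Pairwise (fun a b => a < b) := by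
      refine (hle.and hnd).imp ?_
      rintro a b ⟨h1, h2⟩
      exact lt_of_le_of_ne h1 h2
    exact hlt.filter p

theorem pv_main (paths : List (String × List String)) (all_teams : List String) (team : String)
    (hpre : ∀ v ∈ (PySem.Dict.ofList paths).values, 2 ≤ v.length) :
    get_levels paths all_teams team = get_levels_alt paths all_teams team := by
  have hnd : (PySem.Dict.ofList paths).keys.Nodup := PySem.Dict.nodup_keys_ofList paths
  set d := PySem.Dict.ofList paths with hd
  have hvals : d.values.map (fun p => (p.length : Int) - 1)
      = d.keys.map (fun t => ((d.getD t []).length : Int) - 1) := by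
    rw [PySem.Dict.values_eq_map_keys d hnd [], List.map_map]
    rfl
  -- the two max_length computations agree
  have hm : (if paths.length = 0 then (0 : Int)
        else (PySem.List.max? (d.keys.map (fun t => ((d.getD t []).length : Int) - 1)) (fun x => x)).getD 0)
      = (PySem.List.max? (d.values.map (fun p => (p.length : Int) - 1)) (fun x => x)).getD 0 := by
    by_cases h0 : paths.length = 0
    · have hp : paths = [] := List.length_eq_zero_iff.mp h0
      subst hp
      simp [h0, hd]
      rfl
    · simp [h0, hvals]
  set m : Int := (PySem.List.max? (d.values.map (fun p => (p.length : Int) - 1)) (fun x => x)).getD 0 with hmdef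
  -- every team's level lies in the pre-initialized key range
  have hmem : ∀ t ∈ d.keys, ((d.getD t []).length : Int) - 1 ∈ PySem.List.pyRange 1 (m + 1) 1 := by
    intro t ht
    have hv : d.getD t [] ∈ d.values := by
      rw [PySem.Dict.values_eq_map_keys d hnd []]
      exact List.mem_map_of_mem ht
    have h2 : 2 ≤ (d.getD t []).length := hpre _ hv
    have hmx : ((d.getD t []).length : Int) - 1 ≤ m := by
      have hmem' : ((d.getD t []).length : Int) - 1 ∈ d.values.map (fun p => (p.length : Int) - 1) := by
        rw [hvals]; exact List.mem_map_of_mem ht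
      rcases hmax : PySem.List.max? (d.values.map (fun p => (p.length : Int) - 1)) (fun x => x) with _ | mx
      · rw [(PySem.List.max?_eq_none_iff _ _).mp hmax] at hmem'
        simp at hmem'
      · have hle := PySem.List.max?_isMax hmax _ hmem'
        rw [hmdef, hmax]
        exact hle
    rw [PySem.List.mem_pyRange_one]
    omega
  simp only [get_levels, get_levels_alt]
  rw [← hd, hm, ← hmdef,
    pv_foldl_pair_split d.keys (fun lv t => lv.modify (((d.getD t []).length : Int) - 1) [] (fun v => v ++ [t]))]
  simp only [List.nil_append]
  have hndR : (PySem.List.pyRange 1 (m + 1) 1).Nodup := PySem.List.nodup_pyRange_one 1 (m + 1)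
  set lv0A := (PySem.List.pyRange 0 m 1).foldl (fun lv i => lv.insert (i + 1) ([] : List String)) PySem.Dict.empty with hlv0
  have h0keys : lv0A.keys = PySem.List.pyRange 1 (m + 1) 1 := by
    rw [hlv0, PySem.Dict.keys_foldl_insert_key (PySem.List.pyRange 0 m 1) (fun i => i + 1)
        (fun _ _ => ([] : List String)) PySem.Dict.empty]
    rw [PySem.Dict.keys_empty, PySem.Set.update_nil_left, pv_map_succ_pyRange]
    exact PySem.Set.ofList_eq_self_of_nodup _ hndR
  have h0getD : ∀ c, lv0A.getD c [] = [] :=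
    pv_getD_nil_foldl_insert _ _ (fun c => PySem.Dict.getD_empty c [])
  set lv1 := d.keys.foldl (fun lv t => lv.modify (((d.getD t []).length : Int) - 1) [] (fun v => v ++ [t])) lv0A with hlv1
  have h1getD : ∀ c, lv1.getD c [] = d.keys.filter (fun t => ((d.getD t []).length : Int) - 1 == c) := by
    intro c
    have h := PySem.Dict.getD_foldl_modify_append
      (d.keys.map (fun t => ((((d.getD t []).length : Int) - 1), t))) lv0A c
    rw [List.foldl_map] at h
    simp only [List.filter_map, List.map_map] at h
    rw [hlv1, h, h0getD]
    simp [Function.comp_def]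
  have h1keys : lv1.keys = PySem.List.pyRange 1 (m + 1) 1 := by
    rw [hlv1, PySem.Dict.keys_foldl_modify_key d.keys (fun t => ((d.getD t []).length : Int) - 1)
        ([] : List String) (fun _ t v => v ++ [t]) lv0A, h0keys]
    exact pv_update_of_subset _ _ (by intro x hx; rcases List.mem_map.mp hx with ⟨t, ht, rfl⟩; exact hmem t ht)
  rw [h1keys]
  set R := PySem.List.pyRange 1 (m + 1) 1 with hR
  set lv2 := R.foldl (fun lv l => lv.insert l (PySem.List.sorted (lv.getD l []) (fun x => x) false)) lv1 with hlv2
  have h2keys : lv2.keys = R := by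
    rw [hlv2, PySem.Dict.keys_foldl_insert_key R (fun l => l)
        (fun dd l => PySem.List.sorted (dd.getD l []) (fun x => x) false) lv1, h1keys]
    simp only [List.map_id_fun']
    exact pv_update_of_subset _ _ (fun x hx => hx)
  simp only [Prod.mk.injEq]
  refine ⟨?_, trivial⟩
  rw [PySem.Dict.items_eq_map_keys lv2 (by rw [h2keys]; exact hndR) [], h2keys]
  rw [PySem.Dict.items_foldl_insert_fresh R (fun l => l)
      (fun l => (PySem.List.sorted d.keys (fun t => t) false).filter
        (fun t => ((d.getD t []).length : Int) - 1 == l))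
      PySem.Dict.empty (fun a _ => PySem.Dict.contains_empty _) (by simpa using hndR)]
  have hie : (PySem.Dict.empty : PySem.Dict Int (List String)).items = [] := rfl
  rw [hie, List.nil_append]
  apply List.map_congr_left
  intro k hk
  rw [hlv2, pv_sortfold R lv1 hndR k, if_pos hk, h1getD]
  rw [pv_filter_sorted d.keys _ hnd]

theorem get_levels_spec : Claim_equal_get_levels := by
  intro paths all_teams team _ hpre
  show get_levels paths all_teams team = get_levels_alt paths all_teams team
  exact pv_main paths all_teams team hpre
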